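-- pv_equiv track=rewrite | github.com/iho/rdst | lib/cli/js_extractor.py | _is_inside_comment_or_string
-- ===== SOURCE A (Python) =====
-- def _is_inside_comment_or_string(source: str, pos: int) -> bool:
--     """
--     Check if position is inside a comment or string literal.
--     Simple heuristic — scans backwards from pos for comment/string context.
--     """
--     # Check if we're on a line that starts with // (single-line comment)
--     line_start = source.rfind('\n', 0, pos) + 1
--     line_before = source[line_start:pos].lstrip()
--     if line_before.startswith('//'):
--         return True
--
--     # Check if inside a block comment: look for /* before pos without matching */
--     last_block_open = source.rfind('/*', 0, pos)
--     if last_block_open != -1: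
--         last_block_close = source.rfind('*/', 0, pos)
--         if last_block_close < last_block_open:
--             return True
--
--     # Check if inside a string — count unescaped quotes before pos on same line
--     line_content = source[line_start:pos]
--     in_single = False
--     in_double = False
--     i = 0
--     while i < len(line_content):
--         ch = line_content[i]
--         if ch == '\\':
--             i += 2
--             continue
--         if ch == "'" and not in_double:
--             in_single = not in_single
--         elif ch == '"' and not in_single:
--             in_double = not in_double
--         i += 1
--
--     return in_single or in_double
-- ===== SOURCE B (Python) =====
-- def _is_inside_comment_or_string(source: str, pos: int) -> bool:
--     prefix = source[:pos]
--
--     # Block comment: one forward pass over adjacent pairs; the last '/*' or '*/'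
--     # marker seen decides, instead of comparing two backward rfind searches.
--     in_block = False
--     for a, b in zip(prefix, prefix[1:]):
--         if a == '/' and b == '*':
--             in_block = True
--         elif a == '*' and b == '/':
--             in_block = False
--
--     # Current line = what follows the last newline of the prefix.
--     line = prefix.rpartition('\n')[2]
--
--     # Single forward scan over the line: detects a whitespace-only-prefixed '//'
--     # (seen_code/comment) and tracks the quote context as one 3-valued state,
--     # with Python's two-character backslash skip.
--     chars = list(line)
--     n = len(chars)
--     seen_code = False
--     comment = False
--     state = 0  # 0 = code, 1 = inside '...', 2 = inside "..."
--     i = 0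
--     while i < n:
--         ch = chars[i]
--         if not seen_code and ch not in ' \t\r\x0b\x0c':
--             if ch == '/' and i + 1 < n and chars[i + 1] == '/':
--                 comment = True
--             seen_code = True
--         if ch == '\\':
--             i += 2
--             continue
--         if ch == "'" and state != 2:
--             state = 1 if state != 1 else 0
--         elif ch == '"' and state != 1:
--             state = 2 if state != 2 else 0
--         i += 1
--     return comment or in_block or state != 0
-- ===== Notes on version B (the rewrite author's own statement) =====
-- stated objective: alternative
-- what changed: B replaces A's two backward rfind searches for the block-comment test by a single forward pass over adjacent character pairs (last '/*' or '*/' marker wins), finds the current line with rpartition instead of rfind, and merges A's lstrip/startswith('//') prefix check and two-boolean quote machine into one forward scan with a seen_code/comment flag and a 3-state quote automaton.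
import Mathlib
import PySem

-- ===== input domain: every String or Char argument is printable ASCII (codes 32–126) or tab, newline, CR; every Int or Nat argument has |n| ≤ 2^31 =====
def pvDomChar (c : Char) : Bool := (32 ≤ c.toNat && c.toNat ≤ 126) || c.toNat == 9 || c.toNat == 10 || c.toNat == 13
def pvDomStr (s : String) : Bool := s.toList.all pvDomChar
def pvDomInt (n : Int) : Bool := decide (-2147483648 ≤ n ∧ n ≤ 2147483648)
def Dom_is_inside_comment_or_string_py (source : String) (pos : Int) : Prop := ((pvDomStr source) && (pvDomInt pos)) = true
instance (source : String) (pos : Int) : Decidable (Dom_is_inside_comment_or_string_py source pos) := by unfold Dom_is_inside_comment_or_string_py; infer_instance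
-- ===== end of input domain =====

-- B replaces A's two backward rfind searches for the block-comment test by one forward
-- pass over adjacent pairs, the rfind-based line start by rpartition, and the separate
-- lstrip/startswith check plus two string booleans by one merged scan with a 3-state
-- quote machine (objective: alternative decomposition, same asymptotic cost).

-- ===== PORT A =====
-- A's while loop over line_content: in_single/in_double toggling, '\' skips two chars.
def pvA_scan : List Char → Bool → Bool → Bool × Bool
  | [], s, d => (s, d)
  | c :: rest, s, d =>
    if c = '\\' then pvA_scan rest.tail s d
    else if c = '\'' ∧ d = false then pvA_scan rest (!s) d
    else if c = '"' ∧ s = false then pvA_scan rest s (!d)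
    else pvA_scan rest s d
termination_by l _ _ => l.length
decreasing_by all_goals simp [List.length_tail] <;> omega

def is_inside_comment_or_string_py (source : String) (pos : Int) : Bool :=
  let line_start : Int := PySem.Str.rfindFrom source "\n" 0 (some pos) + 1
  let line_before := PySem.Str.lstrip (PySem.Str.slice source (some line_start) (some pos))
  if PySem.Str.startswith line_before "//" then true
  else
    let last_block_open := PySem.Str.rfindFrom source "/*" 0 (some pos)
    let last_block_close := PySem.Str.rfindFrom source "*/" 0 (some pos)
    if last_block_open ≠ -1 ∧ last_block_close < last_block_open then true
    else
      let line_content := (PySem.Str.slice source (some line_start) (some pos)).toList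
      let r := pvA_scan line_content false false
      (r.1 || r.2)

-- ===== PORT B =====
-- Source B's zip(prefix, prefix[1:]) loop: last '/*' or '*/' pair decides in_block.
def pvB_block : List Char → Bool → Bool
  | a :: b :: rest, f =>
      pvB_block (b :: rest)
        (if a = '/' ∧ b = '*' then true else if a = '*' ∧ b = '/' then false else f)
  | _, f => f

-- Source B's single while loop: seen_code/comment detection plus the 3-state quote machine.
def pvB_scan : List Char → Bool → Bool → Nat → Bool × Nat
  | [], _, comment, st => (comment, st)
  | c :: rest, seen, comment, st =>
    let p : Bool × Bool :=
      if !seen && !(c = ' ' || c = '\t' || c = '\r' || c = '\x0B' || c = '\x0C') then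
        (true, comment || (c = '/' && rest.head? = some '/'))
      else (seen, comment)
    if c = '\\' then pvB_scan rest.tail p.1 p.2 st
    else if c = '\'' && st ≠ 2 then pvB_scan rest p.1 p.2 (if st = 1 then 0 else 1)
    else if c = '"' && st ≠ 1 then pvB_scan rest p.1 p.2 (if st = 2 then 0 else 2)
    else pvB_scan rest p.1 p.2 st
termination_by l _ _ _ => l.length
decreasing_by all_goals simp [List.length_tail] <;> omega

def is_inside_comment_or_string_py_alt (source : String) (pos : Int) : Bool :=
  let pre := (PySem.Str.slice source none (some pos)).toList
  let in_block := pvB_block pre false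
  -- prefix.rpartition('\n')[2]: the part of pre after its last newline
  let line := (pre.reverse.takeWhile (fun c => c ≠ '\n')).reverse
  let r := pvB_scan line false false 0
  r.1 || in_block || r.2 ≠ 0

-- ===== PRECONDITION & SPEC =====
def Spec_is_inside_comment_or_string_py (source : String) (pos : Int) (out : Bool) : Prop := out = is_inside_comment_or_string_py_alt source pos
instance (source : String) (pos : Int) (out : Bool) : Decidable (Spec_is_inside_comment_or_string_py source pos out) := by unfold Spec_is_inside_comment_or_string_py; infer_instance

-- ===== CLAIM (what is proved, stated in full; the proofs are below) =====
def Claim_equal_is_inside_comment_or_string_py : Prop := ∀ (source : String) (pos : Int), Dom_is_inside_comment_or_string_py source pos → Spec_is_inside_comment_or_string_py source pos (is_inside_comment_or_string_py source pos)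

-- ===== LEMMAS AND PROOFS =====

-- rfind.go s sub n returns the largest j ≤ n with sub a prefix of s.drop j, else -1.
lemma pvGo_spec (s sub : List Char) (n : Nat) :
    (PySem.Chars.rfind.go s sub n = -1 ∧ ∀ j ≤ n, ¬ sub.isPrefixOf (s.drop j)) ∨
    (∃ j : Nat, j ≤ n ∧ PySem.Chars.rfind.go s sub n = (j : Int) ∧
      sub.isPrefixOf (s.drop j) ∧ ∀ i, j < i → i ≤ n → ¬ sub.isPrefixOf (s.drop i)) := by
  induction n with
  | zero =>
    by_cases h : sub.isPrefixOf s
    · right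
      exact ⟨0, le_refl _, by simp [PySem.Chars.rfind.go, h], by simpa using h,
        fun i h1 h2 => by omega⟩
    · left
      refine ⟨by simp [PySem.Chars.rfind.go, h], fun j hj => ?_⟩
      interval_cases j; simpa using h
  | succ m ih =>
    by_cases h : sub.isPrefixOf (s.drop (m + 1))
    · right
      exact ⟨m + 1, le_refl _, by simp [PySem.Chars.rfind.go, h], h, fun i h1 h2 => by omega⟩
    · have hgo : PySem.Chars.rfind.go s sub (m + 1) = PySem.Chars.rfind.go s sub m := by
        simp [PySem.Chars.rfind.go, h]
      rcases ih with ⟨h1, h2⟩ | ⟨j, hj, he, hp, hmax⟩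
      · left
        refine ⟨hgo.trans h1, fun j hj => ?_⟩
        rcases Nat.lt_or_ge j (m + 1) with hlt | hge
        · exact h2 j (by omega)
        · have hj' : j = m + 1 := by omega
          subst hj'; exact h
      · right
        refine ⟨j, by omega, hgo.trans he, hp, fun i h1 h2 => ?_⟩
        rcases Nat.lt_or_ge i (m + 1) with hlt | hge
        · exact hmax i h1 (by omega)
        · have hi' : i = m + 1 := by omega
          subst hi'; exact h

lemma pvRfind_spec (s sub : List Char) (hsub : sub ≠ []) :
    (PySem.Chars.rfind s sub = -1 ∧ ∀ j : Nat, ¬ sub.isPrefixOf (s.drop j)) ∨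
    (∃ j : Nat, j < s.length ∧ PySem.Chars.rfind s sub = (j : Int) ∧
      sub.isPrefixOf (s.drop j) ∧ ∀ i : Nat, j < i → ¬ sub.isPrefixOf (s.drop i)) := by
  have hbig : ∀ i : Nat, s.length < i → ¬ sub.isPrefixOf (s.drop i) := by
    intro i hi hpre
    rw [List.drop_of_length_le (by omega)] at hpre
    rw [List.isPrefixOf_iff_prefix, List.prefix_nil] at hpre
    exact hsub hpre
  rcases pvGo_spec s sub s.length with ⟨h1, h2⟩ | ⟨j, hj, he, hp, hmax⟩
  · left
    refine ⟨h1, fun j => ?_⟩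
    rcases Nat.lt_or_ge s.length j with hlt | hge
    · exact hbig j hlt
    · exact h2 j hge
  · right
    have hjlt : j < s.length := by
      by_contra hc
      have : s.drop j = [] := List.drop_of_length_le (by omega)
      rw [this, List.isPrefixOf_iff_prefix, List.prefix_nil] at hp
      exact hsub hp
    refine ⟨j, hjlt, he, hp, fun i hi => ?_⟩
    rcases Nat.lt_or_ge s.length i with hlt | hge
    · exact hbig i hlt
    · exact hmax i hi hge

-- rfind with bounds 0..pos is rfind on the clamped prefix.
lemma pvRfindFrom_eq (s sub : List Char) (pos : Int) :
    PySem.Chars.rfindFrom s sub 0 (some pos) =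
      PySem.Chars.rfind (s.take (PySem.List.clampIdx s.length pos)) sub := by
  unfold PySem.Chars.rfindFrom
  dsimp only
  have he : (if (s.length : Int) < pos then (s.length : Int)
      else if pos < 0 then if pos + s.length < 0 then 0 else pos + s.length else pos) =
      ((PySem.List.clampIdx s.length pos : Nat) : Int) := by
    unfold PySem.List.clampIdx
    split_ifs <;> omega
  rw [he]
  simp only [show ¬ ((0:Int) < 0) by omega, if_false, Int.toNat_natCast]
  have h0 : ¬ ((PySem.List.clampIdx s.length pos : Nat) : Int) < 0 := by omega
  rw [if_neg h0]
  simp only [Int.toNat_zero, List.drop_zero]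
  split_ifs with hr
  · exact hr.symm
  · omega

lemma pvPrefix_eq (source : String) (pos : Int) :
    (PySem.Str.slice source none (some pos)).toList =
      source.toList.take (PySem.List.clampIdx source.toList.length pos) := by
  simp [PySem.Str.slice, PySem.List.slice]

lemma pvChar_eq_iff (c x : Char) : c = x ↔ c.toNat = x.toNat := by
  constructor
  · intro h; rw [h]
  · intro h
    have h1 := Char.ofNat_toNat c
    have h2 := Char.ofNat_toNat x
    rw [h, h2] at h1
    exact h1.symm

lemma pvWs_eq (c : Char) (hdom : pvDomChar c = true) (hnl : c ≠ '\n') :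
    (c = ' ' || c = '\t' || c = '\r' || c = '\x0B' || c = '\x0C') = PySem.Chars.isspace c := by
  have hnl' : ¬ c.toNat = 10 := by
    intro h; exact hnl ((pvChar_eq_iff c '\n').mpr (by simpa using h))
  simp only [pvDomChar, Bool.or_eq_true, Bool.and_eq_true, beq_iff_eq, decide_eq_true_eq] at hdom
  rw [Bool.eq_iff_iff]
  simp only [PySem.Chars.isspace, pvChar_eq_iff, Bool.or_eq_true, Bool.and_eq_true,
    decide_eq_true_eq, show (' ':Char).toNat = 32 from rfl, show ('\t':Char).toNat = 9 from rfl,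
    show ('\r':Char).toNat = 13 from rfl, show ('\x0B':Char).toNat = 11 from rfl,
    show ('\x0C':Char).toNat = 12 from rfl]
  omega

lemma pvStarts2 (c : Char) (rest : List Char) :
    PySem.Chars.startswith (c :: rest) ['/', '/'] = ((c = '/') && (rest.head? = some '/')) := by
  cases rest with
  | nil => simp [PySem.Chars.startswith, List.isPrefixOf]
  | cons r t =>
    simp only [PySem.Chars.startswith, List.isPrefixOf, List.head?]
    rw [Bool.eq_iff_iff]
    simp only [Bool.and_eq_true, beq_iff_eq, decide_eq_true_eq, Option.some.injEq]
    constructor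
    · rintro ⟨h1, h2, -⟩; exact ⟨h1.symm, h2.symm⟩
    · rintro ⟨h1, h2⟩; exact ⟨h1.symm, h2.symm, trivial⟩

def pvEnc (s d : Bool) : Nat := if s then 1 else if d then 2 else 0

lemma pvScan_eq : ∀ (n : Nat) (l : List Char), l.length ≤ n →
    (∀ c ∈ l, pvDomChar c = true ∧ c ≠ '\n') →
    ∀ (seen comment s d : Bool), ¬(s = true ∧ d = true) →
    pvB_scan l seen comment (pvEnc s d) =
      (comment || (!seen && PySem.Chars.startswith (PySem.Chars.lstrip l) ['/', '/']),
       pvEnc (pvA_scan l s d).1 (pvA_scan l s d).2) := by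
  intro n
  induction n with
  | zero =>
    intro l hl _ seen comment s d _
    have hnil : l = [] := List.length_eq_zero_iff.mp (by omega)
    subst hnil
    simp [pvB_scan, pvA_scan, PySem.Chars.lstrip, PySem.Chars.startswith, List.isPrefixOf]
  | succ m ih =>
    intro l hl hdom seen comment s d hsd
    cases l with
    | nil => simp [pvB_scan, pvA_scan, PySem.Chars.lstrip, PySem.Chars.startswith, List.isPrefixOf]
    | cons c rest =>
      have hdc := hdom c List.mem_cons_self
      have hdrest : ∀ x ∈ rest, pvDomChar x = true ∧ x ≠ '\n' :=
        fun x hx => hdom x (List.mem_cons_of_mem _ hx)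
      have hdtail : ∀ x ∈ rest.tail, pvDomChar x = true ∧ x ≠ '\n' :=
        fun x hx => hdrest x (List.mem_of_mem_tail hx)
      have hlen1 : rest.length ≤ m := by simpa using hl
      have hlen2 : rest.tail.length ≤ m := by simp [List.length_tail]; omega
      by_cases hc : c = '\\'
      · subst hc
        rw [show pvB_scan ('\\' :: rest) seen comment (pvEnc s d)
            = pvB_scan rest.tail true comment (pvEnc s d) from by
          cases seen <;> simp [pvB_scan]]
        rw [ih rest.tail hlen2 hdtail true comment s d hsd]
        rw [show pvA_scan ('\\' :: rest) s d = pvA_scan rest.tail s d from by simp [pvA_scan]]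
        simp [PySem.Chars.lstrip, show PySem.Chars.isspace '\\' = false from rfl, pvStarts2]
      · -- c ≠ '\\'
        by_cases hq : c = '\''
        · subst hq
          cases d with
          | true =>
            have hs : s = false := by
              cases s
              · rfl
              · exact absurd ⟨rfl, rfl⟩ hsd
            subst hs
            -- ('\'', F, T) : inside double, quote ignored
            rw [show pvB_scan ('\'' :: rest) seen comment (pvEnc false true)
                = pvB_scan rest true comment (pvEnc false true) from by
              cases seen <;> simp [pvB_scan, pvEnc]]
            rw [ih rest hlen1 hdrest true comment false true (by simp)]
            rw [show pvA_scan ('\'' :: rest) false true = pvA_scan rest false true from by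
              simp [pvA_scan]]
            simp [PySem.Chars.lstrip, show PySem.Chars.isspace '\'' = false from rfl, pvStarts2]
          | false =>
            cases s with
            | false =>
              -- ('\'', F, F) : enter single
              rw [show pvB_scan ('\'' :: rest) seen comment (pvEnc false false)
                  = pvB_scan rest true comment (pvEnc true false) from by
                cases seen <;> simp [pvB_scan, pvEnc]]
              rw [ih rest hlen1 hdrest true comment true false (by simp)]
              rw [show pvA_scan ('\'' :: rest) false false = pvA_scan rest true false from by
                simp [pvA_scan]]
              simp [PySem.Chars.lstrip, show PySem.Chars.isspace '\'' = false from rfl, pvStarts2]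
            | true =>
              -- ('\'', T, F) : leave single
              rw [show pvB_scan ('\'' :: rest) seen comment (pvEnc true false)
                  = pvB_scan rest true comment (pvEnc false false) from by
                cases seen <;> simp [pvB_scan, pvEnc]]
              rw [ih rest hlen1 hdrest true comment false false (by simp)]
              rw [show pvA_scan ('\'' :: rest) true false = pvA_scan rest false false from by
                simp [pvA_scan]]
              simp [PySem.Chars.lstrip, show PySem.Chars.isspace '\'' = false from rfl, pvStarts2]
        · by_cases hqq : c = '"'
          · subst hqq
            cases d with
            | true =>
              have hs : s = false := by
                cases s
                · rfl
                · exact absurd ⟨rfl, rfl⟩ hsd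
              subst hs
              -- ('"', F, T) : leave double
              rw [show pvB_scan ('"' :: rest) seen comment (pvEnc false true)
                  = pvB_scan rest true comment (pvEnc false false) from by
                cases seen <;> simp [pvB_scan, pvEnc]]
              rw [ih rest hlen1 hdrest true comment false false (by simp)]
              rw [show pvA_scan ('"' :: rest) false true = pvA_scan rest false false from by
                simp [pvA_scan]]
              simp [PySem.Chars.lstrip, show PySem.Chars.isspace '"' = false from rfl, pvStarts2]
            | false =>
              cases s with
              | false =>
                -- ('"', F, F) : enter double
                rw [show pvB_scan ('"' :: rest) seen comment (pvEnc false false)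
                    = pvB_scan rest true comment (pvEnc false true) from by
                  cases seen <;> simp [pvB_scan, pvEnc]]
                rw [ih rest hlen1 hdrest true comment false true (by simp)]
                rw [show pvA_scan ('"' :: rest) false false = pvA_scan rest false true from by
                  simp [pvA_scan]]
                simp [PySem.Chars.lstrip, show PySem.Chars.isspace '"' = false from rfl, pvStarts2]
              | true =>
                -- ('"', T, F) : inside single, quote ignored
                rw [show pvB_scan ('"' :: rest) seen comment (pvEnc true false)
                    = pvB_scan rest true comment (pvEnc true false) from by
                  cases seen <;> simp [pvB_scan, pvEnc]]
                rw [ih rest hlen1 hdrest true comment true false (by simp)]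
                rw [show pvA_scan ('"' :: rest) true false = pvA_scan rest true false from by
                  simp [pvA_scan]]
                simp [PySem.Chars.lstrip, show PySem.Chars.isspace '"' = false from rfl, pvStarts2]
          · -- ordinary character: state unchanged on both sides
            have hA : pvA_scan (c :: rest) s d = pvA_scan rest s d := by
              simp [pvA_scan, hc, hq, hqq]
            by_cases hws : (c = ' ' || c = '\t' || c = '\r' || c = '\x0B' || c = '\x0C') = true
            · have hsp : PySem.Chars.isspace c = true := (pvWs_eq c hdc.1 hdc.2) ▸ hws
              rw [show pvB_scan (c :: rest) seen comment (pvEnc s d)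
                  = pvB_scan rest seen comment (pvEnc s d) from by
                cases seen <;> simp [pvB_scan, hc, hq, hqq, hws]]
              rw [ih rest hlen1 hdrest seen comment s d hsd, hA]
              simp [PySem.Chars.lstrip, hsp]
            · have hws' : (c = ' ' || c = '\t' || c = '\r' || c = '\x0B' || c = '\x0C') = false :=
                Bool.eq_false_iff.mpr hws
              have hsp : PySem.Chars.isspace c = false := (pvWs_eq c hdc.1 hdc.2) ▸ hws'
              cases seen with
              | false =>
                rw [show pvB_scan (c :: rest) false comment (pvEnc s d)
                    = pvB_scan rest true (comment || (c = '/' && rest.head? = some '/')) (pvEnc s d) from by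
                  simp [pvB_scan, hc, hq, hqq, hws']]
                rw [ih rest hlen1 hdrest true (comment || (c = '/' && rest.head? = some '/')) s d hsd, hA]
                simp [PySem.Chars.lstrip, hsp, pvStarts2]
              | true =>
                rw [show pvB_scan (c :: rest) true comment (pvEnc s d)
                    = pvB_scan rest true comment (pvEnc s d) from by
                  simp [pvB_scan, hc, hq, hqq]]
                rw [ih rest hlen1 hdrest true comment s d hsd, hA]
                simp [PySem.Chars.lstrip, hsp]

def pvSig (L : List Char) (j : Nat) : Option Bool :=
  if (['/', '*'] : List Char).isPrefixOf (L.drop j) then some true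
  else if (['*', '/'] : List Char).isPrefixOf (L.drop j) then some false
  else none

lemma pvSig_shift (a : Char) (t : List Char) (j : Nat) : pvSig (a :: t) (j + 1) = pvSig t j := by
  simp [pvSig]

lemma pvPrefix2_iff (x y a b : Char) (r : List Char) :
    ([x, y] : List Char).isPrefixOf (a :: b :: r) = true ↔ (a = x ∧ b = y) := by
  simp [List.isPrefixOf]
  constructor
  · rintro ⟨h1, h2⟩; exact ⟨h1.symm, h2.symm⟩
  · rintro ⟨h1, h2⟩; exact ⟨h1.symm, h2.symm⟩

lemma pvSig_small (a : Char) (j : Nat) : pvSig [a] j = none := by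
  cases j <;> simp [pvSig, List.isPrefixOf]

lemma pvB_block_none : ∀ (L : List Char) (f : Bool), (∀ j, pvSig L j = none) → pvB_block L f = f := by
  intro L
  induction L with
  | nil => intro f _; rfl
  | cons a t iht =>
    cases t with
    | nil => intro f _; rfl
    | cons b r =>
      intro f hnone
      have h0 := hnone 0
      simp only [pvSig, List.drop_zero] at h0
      rw [pvB_block]
      have hopen : ¬ (a = '/' ∧ b = '*') := by
        intro h; rw [if_pos ((pvPrefix2_iff _ _ _ _ _).mpr h)] at h0; exact Option.some_ne_none _ h0
      have hclose : ¬ (a = '*' ∧ b = '/') := by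
        intro h
        rw [if_neg (fun hh => hopen ((pvPrefix2_iff _ _ _ _ _).mp hh)),
          if_pos ((pvPrefix2_iff _ _ _ _ _).mpr h)] at h0
        exact Option.some_ne_none _ h0
      rw [if_neg hopen, if_neg hclose]
      exact iht f (fun j => by rw [← pvSig_shift a (b :: r) j]; exact hnone (j + 1))

lemma pvB_block_last : ∀ (L : List Char) (f : Bool) (j : Nat) (b : Bool),
    pvSig L j = some b → (∀ i, j < i → pvSig L i = none) → pvB_block L f = b := by
  intro L
  induction L with
  | nil => intro f j b hj _; simp [pvSig, List.isPrefixOf] at hj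
  | cons a t iht =>
    cases t with
    | nil => intro f j b hj _; rw [pvSig_small] at hj; simp at hj
    | cons bb r =>
      intro f j b hj hmax
      cases j with
      | zero =>
        have hshift : ∀ i, pvSig (bb :: r) i = none := fun i => by
          rw [← pvSig_shift a (bb :: r) i]; exact hmax (i + 1) (by omega)
        rw [pvB_block]
        simp only [pvSig, List.drop_zero] at hj
        by_cases hopen : ([('/' : Char), '*'] : List Char).isPrefixOf (a :: bb :: r) = true
        · rw [if_pos hopen] at hj
          rw [if_pos ((pvPrefix2_iff _ _ _ _ _).mp hopen)]
          rw [pvB_block_none (bb :: r) true hshift]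
          exact (Option.some.injEq _ _ ▸ hj).symm ▸ rfl
        · rw [if_neg hopen] at hj
          by_cases hclose : ([('*' : Char), '/'] : List Char).isPrefixOf (a :: bb :: r) = true
          · rw [if_pos hclose] at hj
            rw [if_neg (fun hh : a = '/' ∧ bb = '*' => hopen ((pvPrefix2_iff _ _ _ _ _).mpr hh)),
              if_pos ((pvPrefix2_iff _ _ _ _ _).mp hclose)]
            rw [pvB_block_none (bb :: r) false hshift]
            exact (Option.some.injEq _ _ ▸ hj).symm ▸ rfl
          · rw [if_neg hclose] at hj; simp at hj
      | succ jj =>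
        rw [pvB_block]
        exact iht _ jj b (by rwa [pvSig_shift] at hj)
          (fun i hi => by rw [← pvSig_shift a (bb :: r) i]; exact hmax (i + 1) (by omega))

lemma pvOpenClose (L : List Char) (j : Nat)
    (h1 : (['/', '*'] : List Char).isPrefixOf (L.drop j) = true)
    (h2 : (['*', '/'] : List Char).isPrefixOf (L.drop j) = true) : False := by
  cases hd : L.drop j with
  | nil => rw [hd] at h1; simp [List.isPrefixOf] at h1
  | cons x t =>
    cases t with
    | nil => rw [hd] at h1; simp [List.isPrefixOf] at h1
    | cons y u =>
      rw [hd] at h1 h2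
      obtain ⟨hx1, -⟩ := (pvPrefix2_iff _ _ _ _ _).mp h1
      obtain ⟨hx2, -⟩ := (pvPrefix2_iff _ _ _ _ _).mp h2
      rw [hx1] at hx2; exact absurd hx2 (by decide)

lemma pvBlock_eq (L : List Char) :
    pvB_block L false =
      decide (PySem.Chars.rfind L ['/', '*'] ≠ -1 ∧
        PySem.Chars.rfind L ['*', '/'] < PySem.Chars.rfind L ['/', '*']) := by
  rcases pvRfind_spec L ['/', '*'] (by simp) with ⟨ho, hno⟩ | ⟨jo, hjo, heo, hpo, hmo⟩
  · rcases pvRfind_spec L ['*', '/'] (by simp) with ⟨hc, hnc⟩ | ⟨jc, hjc, hec, hpc, hmc⟩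
    · rw [pvB_block_none L false (fun j => by simp [pvSig, hno j, hnc j])]
      simp [ho]
    · rw [pvB_block_last L false jc false
        (by simp [pvSig, hno jc, hpc]) (fun i hi => by simp [pvSig, hno i, hmc i hi])]
      simp [ho]
  · rcases pvRfind_spec L ['*', '/'] (by simp) with ⟨hc, hnc⟩ | ⟨jc, hjc, hec, hpc, hmc⟩
    · rw [pvB_block_last L false jo true
        (by simp [pvSig, hpo]) (fun i hi => by simp [pvSig, hmo i hi, hnc i])]
      rw [heo, hc]
      simp; omega
    · have hne : jo ≠ jc := fun h => pvOpenClose L jo hpo (h ▸ hpc)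
      rcases Nat.lt_or_ge jc jo with hlt | hge
      · rw [pvB_block_last L false jo true
          (by simp [pvSig, hpo]) (fun i hi => by simp [pvSig, hmo i hi, hmc i (by omega)])]
        rw [heo, hec]
        have hgoal : ¬ ((jo : Int) = -1) ∧ (jc : Int) < (jo : Int) :=
          ⟨by omega, by exact_mod_cast hlt⟩
        simp [hgoal.1, hgoal.2]
      · have hlt : jo < jc := by omega
        rw [pvB_block_last L false jc false
          (by simp [pvSig, hpc, (hmo jc hlt)]) (fun i hi => by simp [pvSig, hmo i (by omega), hmc i hi])]
        rw [heo, hec]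
        simp; omega

lemma pvSingle_prefix (L : List Char) (i : Nat) (hi : i < L.length) (x : Char) (hx : L[i] = x) :
    ([x] : List Char).isPrefixOf (L.drop i) = true := by
  rw [List.drop_eq_getElem_cons hi]
  simp [List.isPrefixOf, hx]

-- the part of L after its last newline, via rfind
lemma pvLine_eq (L : List Char) :
    (L.reverse.takeWhile (fun c => c ≠ '\n')).reverse =
      L.drop (PySem.Chars.rfind L ['\n'] + 1).toNat := by
  simp only [ne_eq, decide_not]
  rcases pvRfind_spec L ['\n'] (by simp) with ⟨h1, h2⟩ | ⟨j, hj, he, hp, hmax⟩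
  · rw [h1]
    have hno : ∀ c ∈ L, c ≠ '\n' := by
      intro c hc hceq
      subst hceq
      obtain ⟨i, hi, hgi⟩ := List.mem_iff_getElem.mp hc
      exact h2 i (pvSingle_prefix L i hi '\n' hgi)
    have htw : L.reverse.takeWhile (fun c => !decide (c = '\n')) = L.reverse := by
      rw [List.takeWhile_eq_self_iff]
      intro c hc
      simpa using hno c (List.mem_reverse.mp hc)
    simp [htw]
  · rw [he]
    have hjn : ((j : Int) + 1).toNat = j + 1 := by omega
    rw [hjn]
    have hgj : L[j] = '\n' := by
      rw [List.drop_eq_getElem_cons hj] at hp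
      simp [List.isPrefixOf] at hp
      exact hp.symm
    have hafter : ∀ c ∈ L.drop (j + 1), c ≠ '\n' := by
      intro c hc hceq
      subst hceq
      obtain ⟨i, hi, hgi⟩ := List.mem_iff_getElem.mp hc
      rw [List.getElem_drop] at hgi
      have hlen : j + 1 + i < L.length := by
        have := hi; simp [List.length_drop] at this; omega
      exact hmax (j + 1 + i) (by omega) (pvSingle_prefix L _ hlen '\n' hgi)
    conv_lhs => rw [show L = L.take (j + 1) ++ L.drop (j + 1) from (List.take_append_drop _ _).symm]
    rw [List.reverse_append, List.takeWhile_append]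
    have h1' : (L.drop (j + 1)).reverse.takeWhile (fun c => !decide (c = '\n'))
        = (L.drop (j + 1)).reverse := by
      rw [List.takeWhile_eq_self_iff]
      intro c hc
      simpa using hafter c (List.mem_reverse.mp hc)
    rw [h1', if_pos rfl]
    have htake : L.take (j + 1) = L.take j ++ [L[j]] := by
      rw [List.take_add_one]
      simp [List.getElem?_eq_getElem hj]
    rw [htake, List.reverse_append]
    simp [hgj]

lemma pvSliceDrop (ns : List Char) (pos : Int) (k : Int)
    (hk : -1 ≤ k) (hk2 : k < ((PySem.List.clampIdx ns.length pos : Nat) : Int)) :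
    PySem.List.slice ns (some (k + 1)) (some pos)
      = (ns.take (PySem.List.clampIdx ns.length pos)).drop (k + 1).toNat := by
  have hc2 : ((PySem.List.clampIdx ns.length pos : Nat) : Int) ≤ ns.length := by
    unfold PySem.List.clampIdx; split_ifs <;> omega
  have hm : PySem.List.clampIdx ns.length (k + 1) = (k + 1).toNat := by
    unfold PySem.List.clampIdx
    split_ifs <;> omega
  unfold PySem.List.slice
  dsimp only
  rw [hm, List.drop_take]

theorem is_inside_comment_or_string_py_spec : Claim_equal_is_inside_comment_or_string_py := by
  unfold Claim_equal_is_inside_comment_or_string_py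
  intro source pos hDom
  unfold Spec_is_inside_comment_or_string_py
  unfold is_inside_comment_or_string_py is_inside_comment_or_string_py_alt
  dsimp only
  have hdomS : ∀ c ∈ source.toList, pvDomChar c = true := by
    unfold Dom_is_inside_comment_or_string_py at hDom
    simp only [pvDomStr, Bool.and_eq_true, List.all_eq_true] at hDom
    exact hDom.1
  -- shared notation
  have hrfn : PySem.Str.rfindFrom source "\n" 0 (some pos)
      = PySem.Chars.rfind (source.toList.take (PySem.List.clampIdx source.toList.length pos)) ['\n'] := by
    show PySem.Chars.rfindFrom source.toList "\n".toList 0 (some pos) = _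
    rw [pvRfindFrom_eq]
    rfl
  have hrfo : PySem.Str.rfindFrom source "/*" 0 (some pos)
      = PySem.Chars.rfind (source.toList.take (PySem.List.clampIdx source.toList.length pos)) ['/', '*'] := by
    show PySem.Chars.rfindFrom source.toList "/*".toList 0 (some pos) = _
    rw [pvRfindFrom_eq]
    rfl
  have hrfc : PySem.Str.rfindFrom source "*/" 0 (some pos)
      = PySem.Chars.rfind (source.toList.take (PySem.List.clampIdx source.toList.length pos)) ['*', '/'] := by
    show PySem.Chars.rfindFrom source.toList "*/".toList 0 (some pos) = _
    rw [pvRfindFrom_eq]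
    rfl
  set ns := source.toList with hns
  set L := ns.take (PySem.List.clampIdx ns.length pos) with hL
  set k := PySem.Chars.rfind L ['\n'] with hk
  set line := L.drop (k + 1).toNat with hline
  -- bounds on k
  have hkb : -1 ≤ k ∧ k < ((PySem.List.clampIdx ns.length pos : Nat) : Int) ∨ k = -1 := by
    rcases pvRfind_spec L ['\n'] (by simp) with ⟨h1, -⟩ | ⟨j, hj, he, -, -⟩
    · right; rw [hk]; exact h1
    · left
      refine ⟨by rw [hk, he]; omega, ?_⟩
      rw [hk, he]
      have : L.length ≤ PySem.List.clampIdx ns.length pos := by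
        rw [hL]; simp [List.length_take]
      omega
  -- A's line_content and B's line agree
  have hsliceA : (PySem.Str.slice source (some (k + 1)) (some pos)).toList = line := by
    show (String.ofList (PySem.Chars.slice source.toList (some (k + 1)) (some pos))).toList = line
    rw [String.toList_ofList, PySem.Chars.slice_eq_listSlice]
    rcases hkb with ⟨h1, h2⟩ | h1
    · rw [pvSliceDrop ns pos k h1 h2]
    · rw [h1]
      show PySem.List.slice ns (some 0) (some pos) = line
      rw [hline, h1]
      have hs0 : PySem.List.slice ns (some 0) (some pos)
          = ns.take (PySem.List.clampIdx ns.length pos) := by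
        unfold PySem.List.slice
        dsimp only
        rw [show PySem.List.clampIdx ns.length 0 = 0 from by
          unfold PySem.List.clampIdx; simp]
        simp
      rw [hs0]
      norm_num
      exact hL.symm
  have hlineB : (L.reverse.takeWhile (fun c => c ≠ '\n')).reverse = line := pvLine_eq L
  have hpre : (PySem.Str.slice source none (some pos)).toList = L := pvPrefix_eq source pos
  -- line characters are in Dom and are not newlines
  have hmem : ∀ c ∈ line, pvDomChar c = true ∧ c ≠ '\n' := by
    intro c hc
    refine ⟨hdomS c (List.mem_of_mem_take (List.mem_of_mem_drop hc)), ?_⟩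
    rw [← hlineB] at hc
    have := List.mem_takeWhile_imp (List.mem_reverse.mp hc)
    simpa using this
  -- the merged scan versus A's quote machine
  have hscan := pvScan_eq line.length line (le_refl _) hmem false false false false (by simp)
  -- block scan versus the two rfinds
  have hblock := pvBlock_eq L
  -- rewrite everything
  rw [hrfn, hsliceA, hpre, hlineB, hblock, hrfo, hrfc]
  rw [show pvEnc false false = 0 from rfl] at hscan
  rw [hscan]
  -- both sides are now built from the same three atoms
  set cFlag := PySem.Str.startswith (PySem.Str.lstrip (PySem.Str.slice source (some (k + 1)) (some pos))) "//" with hcF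
  have hcFlag : PySem.Chars.startswith (PySem.Chars.lstrip line) ['/', '/'] = cFlag := by
    rw [hcF]
    show _ = PySem.Chars.startswith (PySem.Str.lstrip (PySem.Str.slice source (some (k + 1)) (some pos))).toList "//".toList
    rw [PySem.Str.toList_lstrip, hsliceA]
    rfl
  rw [hcFlag]
  have henc : ∀ a b : Bool, (!decide (pvEnc a b = 0)) = (a || b) := by decide
  by_cases hb : PySem.Chars.rfind L ['/', '*'] ≠ -1 ∧ PySem.Chars.rfind L ['*', '/'] < PySem.Chars.rfind L ['/', '*']
  · cases cFlag <;> simp [hb, henc]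
  · cases cFlag <;> simp [hb, henc]
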